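-- pv_equiv track=rewrite | github.com/ccam80/zotero-chunk-mcp | tests/regenerate_review_md.py | _has_newlines
-- ===== SOURCE A (Python) =====
-- def _has_newlines(headers: list[str], rows: list[list[str]]) -> bool:
--     """Check if any cell in the table contains newlines."""
--     for h in headers:
--         if "\n" in h:
--             return True
--     for row in rows:
--         for cell in row:
--             if "\n" in cell:
--                 return True
--     return False
-- ===== SOURCE B (Python) =====
-- def _has_newlines(headers: list[str], rows: list[list[str]]) -> bool:
--     """Check if any cell in the table contains newlines."""
--     combined = "".join(headers) + "".join(cell for row in rows for cell in row)
--     return "\n" in combined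
-- ===== Notes on version B (the rewrite author's own statement) =====
-- stated objective: simpler
-- what changed: B flattens headers and all row cells into one joined string and performs a single substring membership test, replacing A's nested per-cell early-exit scan.
import Mathlib
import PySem

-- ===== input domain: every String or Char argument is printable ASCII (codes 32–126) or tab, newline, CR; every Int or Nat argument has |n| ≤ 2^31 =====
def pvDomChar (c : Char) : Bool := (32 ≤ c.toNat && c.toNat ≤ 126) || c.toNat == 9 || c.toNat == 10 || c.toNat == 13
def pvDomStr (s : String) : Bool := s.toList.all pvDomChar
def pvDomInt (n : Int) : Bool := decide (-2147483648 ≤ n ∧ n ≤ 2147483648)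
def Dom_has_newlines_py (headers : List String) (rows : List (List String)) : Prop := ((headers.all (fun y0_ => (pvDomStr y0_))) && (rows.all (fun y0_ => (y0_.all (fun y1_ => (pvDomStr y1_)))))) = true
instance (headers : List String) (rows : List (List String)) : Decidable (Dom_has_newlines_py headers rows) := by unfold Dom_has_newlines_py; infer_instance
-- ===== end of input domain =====

-- B replaces A's nested per-cell early-exit scan by joining all headers and row cells into one
-- string and doing a single substring membership test (objective: simpler decomposition).


-- ===== PORT A =====
-- 'for h in headers: if "\n" in h: return True'
def pvHdrLoop : List String → Bool
  | [] => false
  | h :: t => if PySem.Str.isIn "\n" h then true else pvHdrLoop t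

-- inner 'for cell in row: if "\n" in cell: return True'
def pvCellLoop : List String → Bool
  | [] => false
  | c :: t => if PySem.Str.isIn "\n" c then true else pvCellLoop t

-- outer 'for row in rows: …'
def pvRowsLoop : List (List String) → Bool
  | [] => false
  | r :: t => if pvCellLoop r then true else pvRowsLoop t

def has_newlines_py (headers : List String) (rows : List (List String)) : Bool :=
  if pvHdrLoop headers then true else pvRowsLoop rows

-- ===== PORT B =====
-- combined = "".join(headers) + "".join(cell for row in rows for cell in row); return "\n" in combined
-- ('+' of two strings is ported as "".join of the two-element list; exact)
def has_newlines_py_alt (headers : List String) (rows : List (List String)) : Bool :=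
  let combined := PySem.Str.join ""
    [PySem.Str.join "" headers, PySem.Str.join "" (rows.flatMap (fun r => r))]
  PySem.Str.isIn "\n" combined

-- ===== PRECONDITION & SPEC =====
def Spec_has_newlines_py (headers : List String) (rows : List (List String)) (out : Bool) : Prop := out = has_newlines_py_alt headers rows
instance (headers : List String) (rows : List (List String)) (out : Bool) : Decidable (Spec_has_newlines_py headers rows out) := by unfold Spec_has_newlines_py; infer_instance

-- ===== CLAIM (what is proved, stated in full; the proofs are below) =====
def Claim_equal_has_newlines_py : Prop := ∀ (headers : List String) (rows : List (List String)), Dom_has_newlines_py headers rows → Spec_has_newlines_py headers rows (has_newlines_py headers rows)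

-- ===== LEMMAS AND PROOFS =====
theorem pv_isIn_nl (l : List Char) : PySem.Chars.isIn ['\n'] l = true ↔ '\n' ∈ l := by
  rw [PySem.Chars.isIn_iff_infix]
  exact List.singleton_infix_iff _ _

theorem pv_join_nil_flatten (xs : List (List Char)) :
    PySem.Chars.join [] xs = xs.flatten := by
  simp only [PySem.Chars.join, List.intercalate]
  induction xs with
  | nil => simp
  | cons a t ih =>
    cases t with
    | nil => simp
    | cons b u => simp_all [List.intersperse]

theorem pv_hdrLoop_iff (hs : List String) :
    pvHdrLoop hs = true ↔ ∃ h ∈ hs, '\n' ∈ h.toList := by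
  induction hs with
  | nil => simp [pvHdrLoop]
  | cons h t ih => simp [pvHdrLoop, ih, pv_isIn_nl]

theorem pv_cellLoop_iff (cs : List String) :
    pvCellLoop cs = true ↔ ∃ c ∈ cs, '\n' ∈ c.toList := by
  induction cs with
  | nil => simp [pvCellLoop]
  | cons c t ih => simp [pvCellLoop, ih, pv_isIn_nl]

theorem pv_rowsLoop_iff (rs : List (List String)) :
    pvRowsLoop rs = true ↔ ∃ r ∈ rs, ∃ c ∈ r, '\n' ∈ c.toList := by
  induction rs with
  | nil => simp [pvRowsLoop]
  | cons r t ih => simp [pvRowsLoop, ih, pv_cellLoop_iff]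

theorem pv_alt_iff (headers : List String) (rows : List (List String)) :
    has_newlines_py_alt headers rows = true ↔
      (∃ h ∈ headers, '\n' ∈ h.toList) ∨ ∃ r ∈ rows, ∃ c ∈ r, '\n' ∈ c.toList := by
  have h0 : ("" : String).toList = [] := rfl
  have h1 : ("\n" : String).toList = ['\n'] := rfl
  simp only [has_newlines_py_alt, PySem.Str.isIn_eq, PySem.Str.toList_join, h0, h1,
    pv_join_nil_flatten, pv_isIn_nl, List.mem_flatten, List.mem_append, List.mem_map,
    List.mem_flatMap, List.map_cons, List.map_nil, List.flatten_cons, List.flatten_nil,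
    List.append_nil]
  constructor
  · rintro (⟨l, ⟨h, hh, rfl⟩, hm⟩ | ⟨l, ⟨c, ⟨r, hr, hc⟩, rfl⟩, hm⟩)
    · exact Or.inl ⟨h, hh, hm⟩
    · exact Or.inr ⟨r, hr, c, hc, hm⟩
  · rintro (⟨h, hh, hm⟩ | ⟨r, hr, c, hc, hm⟩)
    · exact Or.inl ⟨_, ⟨h, hh, rfl⟩, hm⟩
    · exact Or.inr ⟨_, ⟨c, ⟨r, hr, hc⟩, rfl⟩, hm⟩

-- ===== VERDICT (by name: the statement is the Claim_ definition above) =====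
theorem has_newlines_py_spec : Claim_equal_has_newlines_py := by
  intro headers rows _
  unfold Spec_has_newlines_py
  rw [Bool.eq_iff_iff, pv_alt_iff]
  unfold has_newlines_py
  split_ifs with hh
  · simp [(pv_hdrLoop_iff headers).mp hh]
  · rw [pv_rowsLoop_iff]
    have hno := (not_iff_not.mpr (pv_hdrLoop_iff headers)).mp (by simp [hh])
    push Not at hno
    constructor
    · exact Or.inr
    · rintro (⟨h, hmem, hm⟩ | hr)
      · exact absurd hm (hno h hmem)
      · exact hr
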